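-- pv_equiv track=rewrite | github.com/anushreenataraj/budget-planner-app | budgetapp/routes.py | to_month
-- ===== SOURCE A (Python) =====
-- def to_month(month,year,num):
--     for i in range(1,num+1):
--         if month==12:
--             month=1
--             year=year+1
--         else:
--             month=month+1
--     return (month,year)
-- ===== SOURCE B (Python) =====
-- def to_month(month, year, num):
--     if num <= 0:
--         return (month, year)
--     shifted = month - 1 + num
--     return (1 + shifted % 12, year + shifted // 12)
-- ===== Notes on version B (the rewrite author's own statement) =====
-- stated objective: simpler
-- what changed: replaces the one-step-per-month increment loop with a single closed-form floor-division/modulo computation (O(1) arithmetic instead of num iterations); Pre_ excludes start months above 12 and positive advances stuck below month 1, where A's unwrapped drift (month+num with no 12->1 carry) is an artefact of its loop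
-- outside the precondition, e.g. on to_month(13, 2020, 5): A returns (18, 2020), B returns (6, 2021); on to_month(-5, 2020, 1): A returns (-4, 2020), B returns (8, 2019)
import Mathlib
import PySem

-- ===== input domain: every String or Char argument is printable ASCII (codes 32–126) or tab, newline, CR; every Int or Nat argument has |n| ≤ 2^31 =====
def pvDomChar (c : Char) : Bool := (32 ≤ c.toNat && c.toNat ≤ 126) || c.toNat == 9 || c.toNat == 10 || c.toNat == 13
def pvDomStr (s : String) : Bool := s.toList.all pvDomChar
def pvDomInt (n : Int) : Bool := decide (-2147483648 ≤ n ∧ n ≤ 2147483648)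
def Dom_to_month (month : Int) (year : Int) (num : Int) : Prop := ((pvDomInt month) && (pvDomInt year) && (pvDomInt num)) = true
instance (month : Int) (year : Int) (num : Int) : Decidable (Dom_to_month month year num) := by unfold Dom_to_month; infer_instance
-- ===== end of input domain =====

-- B replaces A's one-step-per-month loop by a single closed-form divmod computation (objective: simpler).


-- ===== PORT A =====
-- one loop body step of A: wrap 12 → 1 with a year carry, else month+1
def toMonthStep (s : Int × Int) : Int × Int :=
  if s.1 == 12 then (1, s.2 + 1) else (s.1 + 1, s.2)

def to_month (month : Int) (year : Int) (num : Int) : List Int :=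
  let r := (PySem.List.pyRange 1 (num + 1) 1).foldl (fun s _ => toMonthStep s) (month, year)
  [r.1, r.2]

-- ===== PORT B =====
def to_month_alt (month : Int) (year : Int) (num : Int) : List Int :=
  if num ≤ 0 then [month, year]
  else
    let shifted := month - 1 + num
    [1 + PySem.Int.mod shifted 12, year + PySem.Int.floordiv shifted 12]

-- ===== PRECONDITION & SPEC =====
-- Pre_ admits every nonpositive advance (a no-op) and every start month ≤ 12 whose advance
-- lands at or past month 1; it excludes start months above 12, and positive advances stuck
-- below month 1, where A's unwrapped drift (month+num with no 12→1 carry) is an artefact of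
-- its increment loop, not behaviour anyone would specify.
def Pre_to_month (month : Int) (year : Int) (num : Int) : Prop :=
  num ≤ 0 ∨ (month ≤ 12 ∧ 1 ≤ month + num)
instance (month : Int) (year : Int) (num : Int) : Decidable (Pre_to_month month year num) := by unfold Pre_to_month; infer_instance

def pvWitness_to_month : Int × Int × Int := (7, 2020, 30)

def Spec_to_month (month : Int) (year : Int) (num : Int) (out : List Int) : Prop := out = to_month_alt month year num
instance (month : Int) (year : Int) (num : Int) (out : List Int) : Decidable (Spec_to_month month year num out) := by unfold Spec_to_month; infer_instance

-- ===== CLAIM =====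
def Claim_equal_to_month : Prop := ∀ (month : Int) (year : Int) (num : Int), Dom_to_month month year num → Pre_to_month month year num → Spec_to_month month year num (to_month month year num)

-- ===== LEMMAS AND PROOFS =====

-- folding a function that ignores the list elements is function iteration
theorem foldl_const_iterate {α β : Type} (f : α → α) :
    ∀ (l : List β) (init : α), l.foldl (fun s _ => f s) init = f^[l.length] init := by
  intro l
  induction l with
  | nil => intro init; simp
  | cons x xs ih =>
      intro init
      simp [List.foldl, ih, Function.iterate_succ_apply]

-- iterating A's step n times from a valid month, in closed form (Euclidean / = floor for the positive divisor 12)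
theorem iterate_step_closed :
    ∀ (n : Nat) (m y : Int), 1 ≤ m + (n : Int) → m ≤ 12 →
      toMonthStep^[n] (m, y) = (1 + (m - 1 + n) % 12, y + (m - 1 + n) / 12) := by
  intro n
  induction n with
  | zero =>
      intro m y h1 h2
      simp only [Nat.cast_zero] at h1
      simp only [Function.iterate_zero, id_eq, Nat.cast_zero]
      exact Prod.ext (by omega) (by omega)
  | succ n ih =>
      intro m y h1 h2
      rw [Function.iterate_succ_apply]
      by_cases hm : m = 12
      · have hstep : toMonthStep (m, y) = (1, y + 1) := by simp [toMonthStep, hm]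
        rw [hstep, ih 1 (y + 1) (by norm_num) (by norm_num)]
        subst hm
        push_cast
        exact Prod.ext (by omega) (by omega)
      · have hstep : toMonthStep (m, y) = (m + 1, y) := by simp [toMonthStep, hm]
        rw [hstep, ih (m + 1) y (by push_cast at h1 ⊢; omega) (by omega)]
        push_cast
        exact Prod.ext (by omega) (by omega)

-- ===== VERDICT =====
theorem to_month_spec : Claim_equal_to_month := by
  intro month year num _ hpre
  unfold Spec_to_month to_month
  rw [foldl_const_iterate, PySem.List.length_pyRange_one]
  by_cases hnum : num ≤ 0
  · have h0 : (num + 1 - 1).toNat = 0 := by omega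
    rw [h0]
    simp [to_month_alt, hnum]
  · obtain ⟨h1, h2⟩ : month ≤ 12 ∧ 1 ≤ month + num := by
      rcases hpre with h | h
      · omega
      · exact h
    have hn : ((num + 1 - 1).toNat : Int) = num := by omega
    rw [iterate_step_closed _ month year (by rw [hn]; omega) h1, hn]
    simp only [to_month_alt, if_neg hnum,
      PySem.Int.mod_eq_emod_of_pos (show (0:Int) < 12 by norm_num),
      PySem.Int.floordiv_eq_ediv_of_pos (show (0:Int) < 12 by norm_num)]
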